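-- pv_equiv track=rewrite | github.com/knmanaa/CourseQA-RAG | eval/run_models_bench.py | derive_base_name
-- ===== SOURCE A (Python) =====
-- def derive_base_name(model_id: str) -> str:
--     short_name = model_id.split("/")[-1].lower()
--     cleaned = []
--     for ch in short_name:
--         if ch.isalnum() or ch in "_-":
--             cleaned.append(ch)
--         else:
--             cleaned.append("_")
--     out = "".join(cleaned).strip("_")
--     while "__" in out:
--         out = out.replace("__", "_")
--     return out
-- ===== SOURCE B (Python) =====
-- def derive_base_name(model_id: str) -> str:
--     # single pass: map each char, skip underscores that would be leading or repeated, drop a trailing one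
--     res = []
--     for ch in model_id.split("/")[-1].lower():
--         c = ch if (ch.isalnum() or ch in "_-") else "_"
--         if c != "_":
--             res.append(c)
--         elif res and res[-1] != "_":
--             res.append("_")
--     if res and res[-1] == "_":
--         res.pop()
--     return "".join(res)
-- ===== Notes on version B (the rewrite author's own statement) =====
-- stated objective: simpler
-- what changed: Replaced A's four phases (map to a list, join, strip('_'), then a while loop of repeated replace('__','_')) by one fused pass that appends an underscore only when the result is non-empty and does not already end in one, popping a single trailing underscore at the end.
import Mathlib
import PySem

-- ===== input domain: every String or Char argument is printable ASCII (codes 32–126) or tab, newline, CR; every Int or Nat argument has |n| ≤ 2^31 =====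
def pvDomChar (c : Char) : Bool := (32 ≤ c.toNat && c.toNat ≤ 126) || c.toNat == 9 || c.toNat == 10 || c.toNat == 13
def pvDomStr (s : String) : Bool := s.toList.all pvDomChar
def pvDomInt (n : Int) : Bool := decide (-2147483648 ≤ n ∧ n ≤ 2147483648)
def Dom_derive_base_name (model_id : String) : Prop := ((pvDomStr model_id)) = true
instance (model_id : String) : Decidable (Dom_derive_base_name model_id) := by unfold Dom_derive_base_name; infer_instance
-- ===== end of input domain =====

-- B fuses A's map / join / strip('_') / repeated replace('__','_') into one pass (objective: simpler).

-- ===== PORT A =====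
-- dbnRep1 is one pass of out.replace("__", "_"); it exists (with the two lemmas below)
-- only so that the port of A's `while "__" in out` loop can be proved terminating.
def dbnRep1 : List Char → List Char
  | [] => []
  | [c] => [c]
  | c1 :: c2 :: t => if c1 = '_' ∧ c2 = '_' then '_' :: dbnRep1 t else c1 :: dbnRep1 (c2 :: t)

theorem dbnGoSpec (fuel : Nat) : ∀ (l acc : List Char), l.length ≤ fuel →
    PySem.Chars.replace.go ['_', '_'] ['_'] fuel l acc = acc.reverse ++ dbnRep1 l := by
  induction fuel with
  | zero =>
    intro l acc h
    have hl : l = [] := List.eq_nil_of_length_eq_zero (Nat.le_zero.mp h)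
    subst hl
    simp [PySem.Chars.replace.go, dbnRep1]
  | succ fuel ih =>
    intro l acc h
    match l with
    | [] => simp [PySem.Chars.replace.go, dbnRep1]
    | [c] =>
      have hpf : (['_', '_'] : List Char).isPrefixOf [c] = false := by
        simp [List.isPrefixOf]
      simp only [PySem.Chars.replace.go, hpf, Bool.false_eq_true, if_false]
      rw [ih [] (c :: acc) (by simp)]
      simp [dbnRep1]
    | c1 :: c2 :: t =>
      by_cases hboth : c1 = '_' ∧ c2 = '_'
      · obtain ⟨rfl, rfl⟩ := hboth
        have hpf : (['_', '_'] : List Char).isPrefixOf ('_' :: '_' :: t) = true := by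
          simp [List.isPrefixOf]
        simp only [PySem.Chars.replace.go, hpf, if_true]
        have hd : List.drop (['_', '_'] : List Char).length ('_' :: '_' :: t) = t := by simp
        have ha : (['_'] : List Char).reverse ++ acc = '_' :: acc := by simp
        rw [hd, ha, ih t ('_' :: acc) (by simp at h ⊢; omega)]
        simp [dbnRep1]
      · have hpf : (['_', '_'] : List Char).isPrefixOf (c1 :: c2 :: t) = false := by
        -- not both underscores, so not a prefix
          apply Bool.eq_false_iff.mpr
          intro hpre
          have h1 := List.isPrefixOf_iff_prefix.mp hpre
          rcases List.cons_prefix_cons.mp h1 with ⟨he1, h2⟩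
          rcases List.cons_prefix_cons.mp h2 with ⟨he2, _⟩
          exact hboth ⟨he1.symm, he2.symm⟩
        simp only [PySem.Chars.replace.go, hpf, Bool.false_eq_true, if_false]
        rw [ih (c2 :: t) (c1 :: acc) (by simp at h ⊢; omega)]
        simp [dbnRep1, hboth]

theorem dbnReplaceEq (l : List Char) :
    PySem.Chars.replace l ['_', '_'] ['_'] = dbnRep1 l := by
  have h0 : (['_', '_'] : List Char).isEmpty = false := by simp
  rw [PySem.Chars.replace]
  simp only [h0, Bool.false_eq_true, if_false]
  simpa using dbnGoSpec l.length l [] le_rfl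

theorem dbnRep1_length_le (l : List Char) : (dbnRep1 l).length ≤ l.length := by
  induction l using dbnRep1.induct with
  | case1 => simp [dbnRep1]
  | case2 c => simp [dbnRep1]
  | case3 c1 c2 t h ih =>
    simp only [dbnRep1, if_pos h, List.length_cons]
    omega
  | case4 c1 c2 t h ih =>
    simp only [dbnRep1, if_neg h, List.length_cons]
    simpa using ih

theorem dbnRep1_length_lt (l : List Char) (h : ['_', '_'] <:+: l) :
    (dbnRep1 l).length < l.length := by
  induction l using dbnRep1.induct with
  | case1 => have := h.length_le; simp at this
  | case2 c => have := h.length_le; simp at this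
  | case3 c1 c2 t hb ih =>
    have hle := dbnRep1_length_le t
    simp only [dbnRep1, if_pos hb, List.length_cons]
    omega
  | case4 c1 c2 t hb ih =>
    have hinf : ['_', '_'] <:+: (c2 :: t) := by
      rcases List.infix_cons_iff.mp h with hp | hi
      · rcases List.cons_prefix_cons.mp hp with ⟨he1, h2⟩
        rcases List.cons_prefix_cons.mp h2 with ⟨he2, _⟩
        exact absurd ⟨he1.symm, he2.symm⟩ hb
      · exact hi
    simp only [dbnRep1, if_neg hb, List.length_cons]
    exact Nat.succ_lt_succ (ih hinf)

-- A's `while "__" in out: out = out.replace("__", "_")`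
def dbnLoop (out : List Char) : List Char :=
  if h : PySem.Chars.isIn ['_', '_'] out then
    dbnLoop (PySem.Chars.replace out ['_', '_'] ['_'])
  else out
termination_by out.length
decreasing_by
  rw [dbnReplaceEq]
  exact dbnRep1_length_lt out ((PySem.Chars.isIn_iff_infix _ _).mp h)

def derive_base_name (model_id : String) : String :=
  let parts := PySem.Chars.splitOn model_id.toList ['/']
  let short_name := PySem.Chars.lower ((PySem.List.pyGet? parts (-1)).getD [])
  let cleaned := short_name.foldl
    (fun acc ch =>
      acc ++ [if PySem.Chars.isalnum ch || (['_', '-'] : List Char).contains ch then ch else '_']) []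
  let out := PySem.Chars.stripChars cleaned ['_']
  String.mk (dbnLoop out)

-- ===== PORT B =====
def derive_base_name_alt (model_id : String) : String :=
  let parts := PySem.Chars.splitOn model_id.toList ['/']
  let short_name := PySem.Chars.lower ((PySem.List.pyGet? parts (-1)).getD [])
  let res := short_name.foldl
    (fun acc ch =>
      let c := if PySem.Chars.isalnum ch || (['_', '-'] : List Char).contains ch then ch else '_'
      if c ≠ '_' then acc ++ [c]
      else if acc ≠ [] ∧ acc.getLast? ≠ some '_' then acc ++ ['_'] else acc) []
  String.mk (if res ≠ [] ∧ res.getLast? = some '_' then res.dropLast else res)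

-- ===== PRECONDITION & SPEC =====
def Spec_derive_base_name (model_id : String) (out : String) : Prop := out = derive_base_name_alt model_id
instance (model_id : String) (out : String) : Decidable (Spec_derive_base_name model_id out) := by unfold Spec_derive_base_name; infer_instance

-- ===== CLAIM (what is proved, stated in full; the proofs are below) =====
def Claim_equal_derive_base_name : Prop := ∀ (model_id : String), Dom_derive_base_name model_id → Spec_derive_base_name model_id (derive_base_name model_id)

-- ===== LEMMAS AND PROOFS =====
def pU (c : Char) : Bool := (['_'] : List Char).contains c

def dbnDropU (l : List Char) : List Char := List.dropWhile pU l

def dbnRDropU (l : List Char) : List Char := (List.dropWhile pU l.reverse).reverse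

def dbnPop (l : List Char) : List Char :=
  if l ≠ [] ∧ l.getLast? = some '_' then l.dropLast else l

def dbnSqueeze : List Char → List Char
  | [] => []
  | [c] => [c]
  | c1 :: c2 :: t => if c1 = '_' ∧ c2 = '_' then dbnSqueeze (c2 :: t) else c1 :: dbnSqueeze (c2 :: t)

def dbnH : Bool → List Char → List Char
  | _, [] => []
  | b, c :: t => if c ≠ '_' then c :: dbnH true t else if b then '_' :: dbnH false t else dbnH b t

theorem pU_eq_false (c : Char) (h : c ≠ '_') : pU c = false := by simp [pU, h]

theorem dbnSqueeze_cons_ne (c : Char) (hc : c ≠ '_') (l : List Char) :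
    dbnSqueeze (c :: l) = c :: dbnSqueeze l := by
  cases l with
  | nil => rfl
  | cons c2 t => simp [dbnSqueeze, hc]

theorem dbnSqueeze_und_cons (l : List Char) :
    dbnSqueeze ('_' :: l) = '_' :: dbnSqueeze (dbnDropU l) := by
  induction l with
  | nil => rfl
  | cons c t ih =>
    by_cases hc : c = '_'
    · subst hc
      have h0 : dbnSqueeze ('_' :: '_' :: t) = dbnSqueeze ('_' :: t) := by simp [dbnSqueeze]
      rw [h0, ih]
      simp [dbnDropU, pU]
    · have h1 : dbnSqueeze ('_' :: c :: t) = '_' :: dbnSqueeze (c :: t) := by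
        simp [dbnSqueeze, hc]
      rw [h1]
      simp [dbnDropU, pU_eq_false c hc]

theorem dbnDropU_squeeze (l : List Char) :
    dbnDropU (dbnSqueeze l) = dbnSqueeze (dbnDropU l) := by
  induction hn : l.length using Nat.strong_induction_on generalizing l with
  | _ n ih =>
    cases l with
    | nil => rfl
    | cons c t =>
      by_cases hc : c = '_'
      · subst hc
        rw [dbnSqueeze_und_cons]
        have hdd : dbnDropU (dbnDropU t) = dbnDropU t := by
          simp [dbnDropU, List.dropWhile_idempotent]
        have hlen : (dbnDropU t).length < n := by
          subst hn
          exact Nat.lt_succ_of_le (List.length_dropWhile_le _ _)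
        calc dbnDropU ('_' :: dbnSqueeze (dbnDropU t))
            = dbnDropU (dbnSqueeze (dbnDropU t)) := by
              simp [dbnDropU, pU]
          _ = dbnSqueeze (dbnDropU (dbnDropU t)) := ih _ hlen _ rfl
          _ = dbnSqueeze (dbnDropU t) := by rw [hdd]
          _ = dbnSqueeze (dbnDropU ('_' :: t)) := by
              simp [dbnDropU, pU]
      · rw [dbnSqueeze_cons_ne c hc]
        simp [dbnDropU, pU_eq_false c hc]
        exact (dbnSqueeze_cons_ne c hc t) ▸ rfl

theorem dbnSqueeze_und_congr {x y : List Char} (h : dbnSqueeze x = dbnSqueeze y) :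
    dbnSqueeze ('_' :: x) = dbnSqueeze ('_' :: y) := by
  rw [dbnSqueeze_und_cons, dbnSqueeze_und_cons, ← dbnDropU_squeeze, ← dbnDropU_squeeze, h]

theorem dbnSqueeze_rep1 (l : List Char) : dbnSqueeze (dbnRep1 l) = dbnSqueeze l := by
  induction l using dbnRep1.induct with
  | case1 => rfl
  | case2 c => rfl
  | case3 c1 c2 t hb ih =>
    obtain ⟨rfl, rfl⟩ := hb
    have h0 : dbnSqueeze ('_' :: '_' :: t) = dbnSqueeze ('_' :: t) := by simp [dbnSqueeze]
    simp only [dbnRep1, if_pos (⟨rfl, rfl⟩ : '_' = '_' ∧ '_' = '_')]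
    rw [h0]
    exact dbnSqueeze_und_congr ih
  | case4 c1 c2 t hb ih =>
    simp only [dbnRep1, if_neg hb]
    by_cases hc1 : c1 = '_'
    · subst hc1
      exact dbnSqueeze_und_congr ih
    · rw [dbnSqueeze_cons_ne c1 hc1, dbnSqueeze_cons_ne c1 hc1, ih]

theorem dbnSqueeze_eq_self (l : List Char) (h : ¬ (['_', '_'] <:+: l)) :
    dbnSqueeze l = l := by
  induction l with
  | nil => rfl
  | cons c t ih =>
    cases t with
    | nil => rfl
    | cons c2 t2 =>
      have hnboth : ¬ (c = '_' ∧ c2 = '_') := by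
        rintro ⟨rfl, rfl⟩
        exact h (List.infix_cons_iff.mpr (Or.inl (by
          exact List.cons_prefix_cons.mpr ⟨rfl, List.cons_prefix_cons.mpr ⟨rfl, List.nil_prefix⟩⟩)))
      have ht : ¬ (['_', '_'] <:+: (c2 :: t2)) := fun hi => h (List.infix_cons hi)
      simp only [dbnSqueeze, if_neg hnboth]
      rw [ih ht]

theorem dbnLoop_eq (l : List Char) : dbnLoop l = dbnSqueeze l := by
  induction l using dbnLoop.induct with
  | case1 l h ih =>
    rw [dbnLoop, dif_pos h, ih, dbnReplaceEq, dbnSqueeze_rep1]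
  | case2 l h =>
    rw [dbnLoop, dif_neg h]
    exact (dbnSqueeze_eq_self l (fun hi => h ((PySem.Chars.isIn_iff_infix _ _).mpr hi))).symm

theorem dbnSqueeze_ne_nil (l : List Char) (h : l ≠ []) : dbnSqueeze l ≠ [] := by
  induction l with
  | nil => simp at h
  | cons c t ih =>
    cases t with
    | nil => simp [dbnSqueeze]
    | cons c2 t2 =>
      by_cases hc : c = '_' ∧ c2 = '_'
      · simpa [dbnSqueeze, hc] using ih (by simp)
      · simp [dbnSqueeze, hc]

theorem dbnRDropU_of_all (l : List Char) (h : l.all pU) : dbnRDropU l = [] := by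
  have h2 : List.rdropWhile pU l = [] :=
    List.rdropWhile_eq_nil_iff.mpr (List.all_eq_true.mp h)
  simpa [List.rdropWhile, dbnRDropU] using h2

theorem dbnDropU_of_all (l : List Char) (h : l.all pU) : dbnDropU l = [] := by
  simp [dbnDropU, List.dropWhile_eq_nil_iff]
  exact fun x hx => List.all_eq_true.mp h x hx

theorem dbnRDropU_cons (c : Char) (t : List Char) (h : pU c = false ∨ ¬ (t.all pU = true)) :
    dbnRDropU (c :: t) = c :: dbnRDropU t := by
  have hrev : (c :: t).reverse = t.reverse ++ [c] := by simp
  rw [dbnRDropU, hrev, List.dropWhile_append]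
  by_cases he : (List.dropWhile pU t.reverse).isEmpty
  · have hnil : List.dropWhile pU t.reverse = [] := by simpa [List.isEmpty_iff] using he
    have hall : ∀ x ∈ t, pU x := by
      have h3 := List.dropWhile_eq_nil_iff.mp hnil
      intro x hx; exact h3 x (by simpa using hx)
    have hcf : pU c = false := by
      rcases h with h | h
      · exact h
      · exact absurd (List.all_eq_true.mpr hall) h
    simp [he, hcf, dbnRDropU, hnil]
  · simp [he, dbnRDropU]

theorem dbnDropU_rdropU (l : List Char) : dbnDropU (dbnRDropU l) = dbnRDropU (dbnDropU l) := by
  induction l with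
  | nil => rfl
  | cons c t ih =>
    by_cases hc : c = '_'
    · subst hc
      by_cases hall : t.all pU
      · have hallc : ('_' :: t).all pU = true := by simp [List.all_cons, pU, hall]
        rw [dbnRDropU_of_all _ hallc]
        have h1 : dbnDropU ('_' :: t) = dbnDropU t := by simp [dbnDropU, pU]
        rw [h1, dbnDropU_of_all t hall]
        simp [dbnDropU, dbnRDropU]
      · rw [dbnRDropU_cons _ _ (Or.inr hall)]
        have h1 : dbnDropU ('_' :: dbnRDropU t) = dbnDropU (dbnRDropU t) := by
          simp [dbnDropU, pU]
        have h2 : dbnDropU ('_' :: t) = dbnDropU t := by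
          simp [dbnDropU, pU]
        rw [h1, h2, ih]
    · have hpc := pU_eq_false c hc
      have h2 : dbnDropU (c :: t) = c :: t := by simp [dbnDropU, hpc]
      rw [dbnRDropU_cons _ _ (Or.inl hpc), h2]
      simp [dbnDropU, hpc]
      exact (dbnRDropU_cons c t (Or.inl hpc)).symm

theorem dbnPop_cons_of_ne_nil (c : Char) (y : List Char) (hy : y ≠ []) :
    dbnPop (c :: y) = c :: dbnPop y := by
  cases y with
  | nil => exact absurd rfl hy
  | cons a b =>
    by_cases hl : (a :: b).getLast? = some '_'
    · simp [dbnPop, List.getLast?_cons_cons, hl]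
    · simp [dbnPop, List.getLast?_cons_cons, hl]

theorem dbnPop_cons_ne (c : Char) (hc : c ≠ '_') (y : List Char) :
    dbnPop (c :: y) = c :: dbnPop y := by
  cases y with
  | nil => simp [dbnPop, hc]
  | cons a b => exact dbnPop_cons_of_ne_nil c _ (by simp)

theorem dbnPop_squeeze (l : List Char) : dbnPop (dbnSqueeze l) = dbnSqueeze (dbnRDropU l) := by
  induction hn : l.length using Nat.strong_induction_on generalizing l with
  | _ n ih =>
    cases l with
    | nil => rfl
    | cons c t =>
      by_cases hc : c = '_'
      · subst hc
        by_cases hall : t.all pU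
        · have h1 : dbnDropU t = [] := dbnDropU_of_all t hall
          rw [dbnSqueeze_und_cons, h1]
          have hallc : ('_' :: t).all pU := by simp [List.all_cons, pU, hall]
          rw [dbnRDropU_of_all _ hallc]
          simp [dbnSqueeze, dbnPop]
        · rw [dbnSqueeze_und_cons]
          have hdnil : dbnDropU t ≠ [] := by
            intro hcon
            exact hall (List.all_eq_true.mpr (List.dropWhile_eq_nil_iff.mp hcon))
          have hsq : dbnSqueeze (dbnDropU t) ≠ [] := dbnSqueeze_ne_nil _ hdnil
          rw [dbnPop_cons_of_ne_nil _ _ hsq]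
          have hlen : (dbnDropU t).length < n := by
            subst hn
            exact Nat.lt_succ_of_le (List.length_dropWhile_le _ _)
          rw [ih _ hlen _ rfl, ← dbnDropU_rdropU, ← dbnSqueeze_und_cons,
            ← dbnRDropU_cons '_' t (Or.inr hall)]
      · rw [dbnSqueeze_cons_ne c hc, dbnPop_cons_ne c hc]
        have hlen : t.length < n := by subst hn; simp
        rw [ih _ hlen _ rfl, dbnRDropU_cons c t (Or.inl (pU_eq_false c hc)),
          dbnSqueeze_cons_ne c hc]

theorem dbnH_eq (m : List Char) :
    dbnH true m = dbnSqueeze m ∧ dbnH false m = dbnSqueeze (dbnDropU m) := by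
  induction m with
  | nil => exact ⟨rfl, rfl⟩
  | cons c t ih =>
    by_cases hc : c = '_'
    · subst hc
      refine ⟨?_, ?_⟩
      · rw [dbnSqueeze_und_cons]
        simpa [dbnH] using ih.2
      · have h1 : dbnDropU ('_' :: t) = dbnDropU t := by simp [dbnDropU, pU]
        rw [h1]
        simpa [dbnH] using ih.2
    · refine ⟨?_, ?_⟩
      · rw [dbnSqueeze_cons_ne c hc]
        simpa [dbnH, hc] using ih.1
      · have h1 : dbnDropU (c :: t) = c :: t := by simp [dbnDropU, pU_eq_false c hc]
        rw [h1, dbnSqueeze_cons_ne c hc]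
        simpa [dbnH, hc] using ih.1

theorem dbnFoldB_eq (m : List Char) : ∀ (acc : List Char),
    List.foldl (fun acc c =>
      if c ≠ '_' then acc ++ [c]
      else if acc ≠ [] ∧ acc.getLast? ≠ some '_' then acc ++ ['_'] else acc) acc m
    = acc ++ dbnH (decide (acc ≠ [] ∧ acc.getLast? ≠ some '_')) m := by
  induction m with
  | nil => intro acc; simp [dbnH]
  | cons c t ih =>
    intro acc
    simp only [List.foldl_cons]
    by_cases hc : c = '_'
    · subst hc
      by_cases hb : acc ≠ [] ∧ acc.getLast? ≠ some '_'
      · rw [if_neg (by simp), if_pos hb, ih]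
        have hflag : decide ((acc ++ ['_']) ≠ [] ∧ (acc ++ ['_']).getLast? ≠ some '_') = false := by
          simp [List.getLast?_concat]
        rw [hflag]
        have h2 : dbnH (decide (acc ≠ [] ∧ acc.getLast? ≠ some '_')) ('_' :: t)
            = '_' :: dbnH false t := by
          simp [dbnH, hb]
        rw [h2]
        simp
      · rw [if_neg (by simp), if_neg hb, ih]
        have h2 : dbnH (decide (acc ≠ [] ∧ acc.getLast? ≠ some '_')) ('_' :: t)
            = dbnH (decide (acc ≠ [] ∧ acc.getLast? ≠ some '_')) t := by
          simp [dbnH, hb]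
        rw [h2]
    · rw [if_pos hc, ih]
      have hflag : decide ((acc ++ [c]) ≠ [] ∧ (acc ++ [c]).getLast? ≠ some '_') = true := by
        simp [List.getLast?_concat, hc]
      rw [hflag]
      have h2 : dbnH (decide (acc ≠ [] ∧ acc.getLast? ≠ some '_')) (c :: t)
          = c :: dbnH true t := by
        simp [dbnH, hc]
      rw [h2]
      simp

-- ===== VERDICT (by name: the statement is the Claim_ definition above) =====
theorem dbnMain (f : Char → Char) (short : List Char) :
    dbnLoop (PySem.Chars.stripChars (List.foldl (fun acc ch => acc ++ [f ch]) [] short) ['_'])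
    = dbnPop (List.foldl (fun acc ch =>
        if f ch ≠ '_' then acc ++ [f ch]
        else if acc ≠ [] ∧ acc.getLast? ≠ some '_' then acc ++ ['_'] else acc) [] short) := by
  rw [PySem.List.foldl_append_singleton_eq_map, List.nil_append]
  have h1 : List.foldl (fun acc ch =>
        if f ch ≠ '_' then acc ++ [f ch]
        else if acc ≠ [] ∧ acc.getLast? ≠ some '_' then acc ++ ['_'] else acc) [] short
      = List.foldl (fun acc c =>
        if c ≠ '_' then acc ++ [c]
        else if acc ≠ [] ∧ acc.getLast? ≠ some '_' then acc ++ ['_'] else acc) [] (List.map f short) :=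
    (List.foldl_map (f := f)
      (g := fun acc c =>
        if c ≠ '_' then acc ++ [c]
        else if acc ≠ [] ∧ acc.getLast? ≠ some '_' then acc ++ ['_'] else acc)
      (l := short) (init := [])).symm
  rw [h1, dbnFoldB_eq]
  have h2 : PySem.Chars.stripChars (List.map f short) ['_']
      = dbnRDropU (dbnDropU (List.map f short)) := rfl
  rw [h2, dbnLoop_eq]
  have h3 : ([] : List Char) ++ dbnH
        (decide (([] : List Char) ≠ [] ∧ ([] : List Char).getLast? ≠ some '_'))
        (List.map f short)
      = dbnSqueeze (dbnDropU (List.map f short)) := by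
    simpa using (dbnH_eq (List.map f short)).2
  rw [h3, dbnPop_squeeze]

theorem derive_base_name_spec : Claim_equal_derive_base_name := by
  unfold Claim_equal_derive_base_name Spec_derive_base_name
  intro model_id _
  simp only [derive_base_name, derive_base_name_alt]
  exact congrArg String.mk
    (dbnMain (fun ch =>
      if PySem.Chars.isalnum ch || (['_', '-'] : List Char).contains ch then ch else '_') _)
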